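-- pv_equiv track=rewrite | github.com/TDBProductions/BasicGen | RollLogic.py | mentzerMercyRule
-- ===== SOURCE A (Python) =====
-- def mentzerMercyRule(StatsArray):
--     i = 0
--     for element in StatsArray:
--         if element < 6:
--             i = i + 1
--         if i >= 2:
--             return True
--     if max(StatsArray) < 9:
--         return True
--     return False
-- ===== SOURCE B (Python) =====
-- def mentzerMercyRule(StatsArray):
--     s = sorted(StatsArray)
--     if len(s) >= 2 and s[1] < 6:
--         return True
--     return max(StatsArray) < 9
-- ===== Notes on version B (the rewrite author's own statement) =====
-- stated objective: alternative
-- what changed: Replaces A's counting loop with early return by a sort-then-index test: the second-smallest element being below 6 is equivalent to at least two stats below 6; otherwise fall back to max(StatsArray) < 9.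
import Mathlib
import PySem

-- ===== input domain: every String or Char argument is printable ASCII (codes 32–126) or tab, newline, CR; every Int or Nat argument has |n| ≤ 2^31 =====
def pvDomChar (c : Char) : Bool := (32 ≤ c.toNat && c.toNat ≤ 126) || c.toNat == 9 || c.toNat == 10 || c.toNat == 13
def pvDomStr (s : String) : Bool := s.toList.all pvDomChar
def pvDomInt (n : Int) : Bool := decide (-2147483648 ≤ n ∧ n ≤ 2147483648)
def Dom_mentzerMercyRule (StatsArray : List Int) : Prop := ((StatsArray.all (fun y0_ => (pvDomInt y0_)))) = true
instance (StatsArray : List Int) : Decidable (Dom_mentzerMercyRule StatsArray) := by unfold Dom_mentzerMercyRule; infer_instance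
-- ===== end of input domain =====

-- B replaces A's counting loop (early return at two stats below 6) by a sort-then-index
-- test on the second-smallest element; same cost class, alternative algorithm.


-- ===== PORT A =====
-- the for-loop with counter i and early 'return True'; none = fell off the loop
def mentzerLoop : List Int → Int → Option Bool
  | [], _ => none
  | e :: rest, i =>
    let i' := if e < 6 then i + 1 else i
    if 2 ≤ i' then some true else mentzerLoop rest i'

def mentzerMercyRule (StatsArray : List Int) : Bool :=
  match mentzerLoop StatsArray 0 with
  | some b => b
  | none =>
    match PySem.List.max? StatsArray (fun x => x) with
    | some m => if m < 9 then true else false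
    | none => false  -- Python raises ValueError (max of empty) here; excluded by Pre_

-- ===== PORT B =====
def mentzerMercyRule_alt (StatsArray : List Int) : Bool :=
  let s := PySem.List.sorted StatsArray (fun x => x) false
  if 2 ≤ s.length ∧ PySem.List.pyGetD s 1 0 < 6 then true
  else
    match PySem.List.max? StatsArray (fun x => x) with
    | some m => decide (m < 9)
    | none => false  -- max([]) raises in Python too; excluded by Pre_

-- ===== PRECONDITION & SPEC =====
-- A raises ValueError (max of an empty sequence) on the empty list; B raises there too.
def Pre_mentzerMercyRule (StatsArray : List Int) : Prop := StatsArray ≠ []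
instance (StatsArray : List Int) : Decidable (Pre_mentzerMercyRule StatsArray) := by unfold Pre_mentzerMercyRule; infer_instance
def pvWitness_mentzerMercyRule : List Int := ([3, 4, 10])

def Spec_mentzerMercyRule (StatsArray : List Int) (out : Bool) : Prop := out = mentzerMercyRule_alt StatsArray
instance (StatsArray : List Int) (out : Bool) : Decidable (Spec_mentzerMercyRule StatsArray out) := by unfold Spec_mentzerMercyRule; infer_instance

-- ===== CLAIM (what is proved, stated in full; the proofs are below) =====
def Claim_equal_mentzerMercyRule : Prop := ∀ (StatsArray : List Int), Dom_mentzerMercyRule StatsArray → Pre_mentzerMercyRule StatsArray → Spec_mentzerMercyRule StatsArray (mentzerMercyRule StatsArray)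

-- ===== LEMMAS AND PROOFS =====

-- A's loop returns some true exactly when the running count reaches 2, i.e. when
-- i plus the number of elements below 6 is at least 2 (for the start values 0 and 1).
theorem mentzerLoop_eq (xs : List Int) : ∀ i : Int, 0 ≤ i → i ≤ 1 →
    mentzerLoop xs i =
      if 2 ≤ i + (xs.countP (fun e => decide (e < 6)) : Int) then some true else none := by
  induction xs with
  | nil =>
    intro i h0 h1
    simp [mentzerLoop]
    omega
  | cons e rest ih =>
    intro i h0 h1
    by_cases he : e < 6
    · simp only [mentzerLoop, he, if_true, List.countP_cons, decide_eq_true_eq]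
      by_cases h2 : 2 ≤ i + 1
      · rw [if_pos h2, if_pos (by push_cast; omega)]
      · rw [if_neg h2, ih (i + 1) (by omega) (by omega)]
        have : i + 1 + (rest.countP (fun e => decide (e < 6)) : Int)
            = i + ((rest.countP (fun e => decide (e < 6)) : Int) + 1) := by ring
        push_cast
        rw [this]
    · simp only [mentzerLoop, he, if_false, List.countP_cons, decide_eq_true_eq]
      rw [if_neg (by omega), ih i h0 h1]
      simp

-- In a ≤-sorted list, having at least two elements below 6 is exactly
-- 'length ≥ 2 and the element at index 1 is below 6'.
theorem count_lt6_iff_sorted_snd (s : List Int) (hs : s.Pairwise (· ≤ ·)) :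
    2 ≤ s.countP (fun e => decide (e < 6)) ↔
      2 ≤ s.length ∧ PySem.List.pyGetD s 1 0 < 6 := by
  match s, hs with
  | [], _ => simp
  | [a], _ =>
    simp only [List.countP_cons, List.countP_nil, List.length_singleton]
    constructor
    · intro h; exfalso; by_cases ha : a < 6 <;> simp [ha] at h
    · rintro ⟨h, -⟩; omega
  | a :: b :: t, hs =>
    have hab : a ≤ b := (List.pairwise_cons.mp hs).1 b (by simp)
    have hbt : ∀ y ∈ t, b ≤ y := fun y hy => (List.pairwise_cons.mp (List.pairwise_cons.mp hs).2).1 y hy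
    have hget : PySem.List.pyGetD (a :: b :: t) (1 : Int) 0 = b := by
      simp [PySem.List.pyGetD, PySem.List.pyGet?, PySem.List.pyIdx?]
    rw [hget]
    constructor
    · intro hc
      refine ⟨by simp, ?_⟩
      by_contra hb6
      rw [not_lt] at hb6
      have ht0 : t.countP (fun e => decide (e < 6)) = 0 := by
        rw [List.countP_eq_zero]
        intro y hy
        simp only [decide_eq_true_eq]
        exact fun h => absurd (hbt y hy) (by omega)
      simp only [List.countP_cons, ht0, decide_eq_true_eq] at hc
      have : ¬ b < 6 := by omega
      by_cases ha : a < 6 <;> simp [ha, this] at hc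
    · rintro ⟨-, hb6⟩
      have ha6 : a < 6 := lt_of_le_of_lt hab hb6
      simp only [List.countP_cons, decide_eq_true_eq, if_pos ha6, if_pos hb6]
      omega

-- ===== VERDICT (by name: the statement is the Claim_ definition above) =====
theorem mentzerMercyRule_spec : Claim_equal_mentzerMercyRule := by
  intro xs _ _
  unfold Spec_mentzerMercyRule mentzerMercyRule mentzerMercyRule_alt
  set s := PySem.List.sorted xs (fun x => x) false with hsdef
  have hperm : s.Perm xs := PySem.List.sorted_perm xs (fun x => x) false
  have hcount : s.countP (fun e => decide (e < 6)) = xs.countP (fun e => decide (e < 6)) :=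
    hperm.countP_eq _
  have hpair : s.Pairwise (· ≤ ·) := by
    simpa using PySem.List.sorted_pairwise xs (fun x => x)
  have hiff := count_lt6_iff_sorted_snd s hpair
  rw [hcount] at hiff
  rw [mentzerLoop_eq xs 0 (by omega) (by omega)]
  by_cases hc : 2 ≤ xs.countP (fun e => decide (e < 6))
  · rw [if_pos (by omega), if_pos (hiff.mp hc)]
  · rw [if_neg (by omega), if_neg (fun h => hc (hiff.mpr h))]
    cases PySem.List.max? xs (fun x => x) with
    | none => rfl
    | some m => by_cases hm : m < 9 <;> simp [hm]
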